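-- pv_equiv track=rewrite | github.com/StephaChrGruber/ProjectQaAssistant | backend/app/services/tool_classes.py | class_descendants
-- ===== SOURCE A (Python) =====
-- from typing import Any
--
-- def normalize_class_key(value: str | None) -> str | None:
--     raw = str(value or "").strip()
--     if not raw:
--         return None
--     key = raw.replace("/", ".")
--     while ".." in key:
--         key = key.replace("..", ".")
--     key = key.strip(".")
--     return key or None
--
-- def class_descendants(rows: list[dict[str, Any]], class_key: str) -> set[str]:
--     needle = normalize_class_key(class_key)
--     if not needle:
--         return set()
--     by_parent: dict[str, set[str]] = {}
--     for row in rows: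
--         parent = str(row.get("parent_key") or "").strip()
--         key = str(row.get("key") or "").strip()
--         if not key:
--             continue
--         if parent:
--             by_parent.setdefault(parent, set()).add(key)
--
--     out: set[str] = set()
--     stack: list[str] = [needle]
--     while stack:
--         current = stack.pop()
--         if current in out:
--             continue
--         out.add(current)
--         for child in by_parent.get(current, set()):
--             stack.append(child)
--     return out
-- ===== SOURCE B (Python) =====
-- # B: same parent->children index (lists instead of sets), but the reachability is a
-- # recursive depth-first visit instead of A's explicit stack-pop loop; the result is a
-- # set, so the visiting order (children in reverse insertion order) is immaterial.
-- def normalize_class_key(value):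
--     raw = str(value or "").strip()
--     if not raw:
--         return None
--     key = raw.replace("/", ".")
--     while ".." in key:
--         key = key.replace("..", ".")
--     key = key.strip(".")
--     return key or None
--
-- def class_descendants(rows, class_key):
--     needle = normalize_class_key(class_key)
--     if not needle:
--         return set()
--     by_parent = {}
--     for row in rows:
--         parent = str(row.get("parent_key") or "").strip()
--         key = str(row.get("key") or "").strip()
--         if not key or not parent:
--             continue
--         children = by_parent.setdefault(parent, [])
--         if key not in children:
--             children.append(key)
--     out = set()
--     def visit(node):
--         if node in out:
--             return
--         out.add(node)
--         for child in reversed(by_parent.get(node, [])):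
--             visit(child)
--     visit(needle)
--     return out
-- ===== Notes on version B (the rewrite author's own statement) =====
-- stated objective: alternative
-- what changed: The explicit stack-pop loop is replaced by a recursive depth-first visit helper seeded with the needle, and the parent->children index stores deduplicated lists instead of sets; the returned set of descendants is identical.
import Mathlib
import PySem

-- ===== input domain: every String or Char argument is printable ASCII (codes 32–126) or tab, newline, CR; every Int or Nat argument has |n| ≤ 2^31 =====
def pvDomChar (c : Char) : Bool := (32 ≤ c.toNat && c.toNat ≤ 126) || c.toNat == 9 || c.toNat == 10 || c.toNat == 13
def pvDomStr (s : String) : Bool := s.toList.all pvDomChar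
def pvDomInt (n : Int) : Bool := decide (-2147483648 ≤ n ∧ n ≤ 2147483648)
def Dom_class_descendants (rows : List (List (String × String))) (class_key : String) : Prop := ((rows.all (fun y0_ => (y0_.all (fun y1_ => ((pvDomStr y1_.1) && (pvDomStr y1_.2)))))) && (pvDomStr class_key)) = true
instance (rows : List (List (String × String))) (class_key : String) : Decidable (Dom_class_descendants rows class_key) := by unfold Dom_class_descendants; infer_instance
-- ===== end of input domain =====

-- B replaces A's explicit stack-pop loop by a recursive depth-first visit over a
-- parent→children index of lists; the return value is a set, so visiting order is immaterial.

-- ===== PORT A =====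

-- helper shared by both ports: normalize_class_key is identical in Source A and Source B.
-- the `while ".." in key` loop is run with fuel = length of key (each replace of ".."
-- by "." strictly shortens the string, so the fuel is never exhausted).
def dedotsFuel : Nat → String → String
  | 0, key => key
  | n + 1, key =>
    if PySem.Str.isIn ".." key then dedotsFuel n (PySem.Str.replace key ".." ".") else key

def normalize_class_key (value : String) : Option String :=
  let raw := PySem.Str.strip (if value = "" then "" else value)  -- str(value or "").strip()
  if raw = "" then none
  else
    let key := PySem.Str.replace raw "/" "."
    let key := dedotsFuel key.toList.length key
    let key := PySem.Str.stripChars key "."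
    if key = "" then none else some key

-- A's by_parent build: dict of sets, `by_parent.setdefault(parent, set()).add(key)`
def buildIndexA (rows : List (List (String × String))) : PySem.Dict String (PySem.Set String) :=
  rows.foldl (fun d row =>
    let parent := PySem.Str.strip (((PySem.Dict.mk row).get? "parent_key").getD "")
    let key := PySem.Str.strip (((PySem.Dict.mk row).get? "key").getD "")
    if key = "" then d
    else if parent = "" then d
    else PySem.Dict.modify d parent PySem.Set.empty (fun s => PySem.Set.add s key))
    PySem.Dict.empty

-- used by descLoop's termination argument (and by the proofs below)
theorem getD_mem_flatten (d : PySem.Dict String (List String)) (k x : String)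
    (hx : x ∈ PySem.Dict.getD d k []) : x ∈ d.values.flatten := by
  rw [PySem.Dict.getD_eq_get?_getD] at hx
  cases h : PySem.Dict.get? d k with
  | none => rw [h] at hx; simp at hx
  | some v =>
    rw [h] at hx
    have hv : v ∈ d.values :=
      List.mem_map.mpr ⟨(k, v), PySem.Dict.mem_items_of_get?_eq_some _ h, rfl⟩
    exact List.mem_flatten.mpr ⟨v, hv, hx⟩

theorem length_getD_le (d : PySem.Dict String (List String)) (k : String) :
    (PySem.Dict.getD d k []).length ≤ d.values.flatten.length := by
  rw [PySem.Dict.getD_eq_get?_getD]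
  cases h : PySem.Dict.get? d k with
  | none => simp
  | some v =>
    have hv : v ∈ d.values :=
      List.mem_map.mpr ⟨(k, v), PySem.Dict.mem_items_of_get?_eq_some _ h, rfl⟩
    simpa using (List.sublist_flatten_of_mem hv).length_le

-- A's while-stack loop: pop from the top (head), push children on the top
def descLoop (byp : PySem.Dict String (PySem.Set String)) (out : PySem.Set String)
    (stack : List String) : PySem.Set String :=
  match stack with
  | [] => out
  | c :: rest =>
    if h : PySem.Set.contains out c = true then
      descLoop byp out rest
    else
      descLoop byp (PySem.Set.add out c)
        ((PySem.Dict.getD byp c PySem.Set.empty).reverse ++ rest)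
termination_by
  ((stack ++ byp.values.flatten).toFinset \ out.toFinset).card
      * (byp.values.flatten.length + 1) + stack.length
decreasing_by
  · -- popped element already visited
    have hc : c ∈ out := by simpa [PySem.Set.contains] using h
    have hset : ((c :: rest ++ byp.values.flatten).toFinset \ out.toFinset)
        = ((rest ++ byp.values.flatten).toFinset \ out.toFinset) := by
      simp only [List.cons_append, List.toFinset_cons]
      exact Finset.insert_sdiff_of_mem _ (by simpa using hc)
    rw [hset]; simp only [List.length_cons]; omega
  · -- new element: out grows, the unvisited pool shrinks
    have hc : c ∉ out := by simpa [PySem.Set.contains] using h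
    have hadd : (PySem.Set.add out c) = out ++ [c] := by
      simp [PySem.Set.add, PySem.Set.contains, hc]
    have hcS : c ∈ ((c :: rest ++ byp.values.flatten).toFinset \ out.toFinset) :=
      Finset.mem_sdiff.mpr ⟨by simp, by simpa using hc⟩
    have hsub : (((PySem.Dict.getD byp c PySem.Set.empty).reverse ++ rest ++ byp.values.flatten).toFinset
          \ (PySem.Set.add out c).toFinset)
        ⊆ ((c :: rest ++ byp.values.flatten).toFinset \ out.toFinset).erase c := by
      intro x hx
      rcases Finset.mem_sdiff.mp hx with ⟨hx1, hx2⟩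
      rw [hadd] at hx2
      have hxout : x ∉ out := fun hxo => hx2 (by simp [hxo])
      have hxc : x ≠ c := fun hxe => hx2 (by simp [hxe])
      refine Finset.mem_erase.mpr ⟨hxc, Finset.mem_sdiff.mpr ⟨?_, by simpa using hxout⟩⟩
      simp only [List.mem_toFinset, List.mem_append, List.mem_reverse, List.mem_cons] at hx1 ⊢
      rcases hx1 with (hch | hr) | hv
      · exact Or.inr (getD_mem_flatten byp c x hch)
      · exact Or.inl (Or.inr hr)
      · exact Or.inr hv
    have hcard : (((PySem.Dict.getD byp c PySem.Set.empty).reverse ++ rest ++ byp.values.flatten).toFinset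
          \ (PySem.Set.add out c).toFinset).card + 1
        ≤ ((c :: rest ++ byp.values.flatten).toFinset \ out.toFinset).card := by
      have h1 := Finset.card_le_card hsub
      have h2 := Finset.card_erase_of_mem hcS
      have h3 : 1 ≤ ((c :: rest ++ byp.values.flatten).toFinset \ out.toFinset).card :=
        Finset.card_pos.mpr ⟨c, hcS⟩
      omega
    have hlen : (PySem.Dict.getD byp c PySem.Set.empty).length ≤ byp.values.flatten.length :=
      length_getD_le byp c
    have hmul := Nat.mul_le_mul_right (byp.values.flatten.length + 1) hcard
    simp only [List.length_append, List.length_reverse, List.length_cons]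
    nlinarith [hmul, hlen]

def class_descendants (rows : List (List (String × String))) (class_key : String) : List String :=
  match normalize_class_key class_key with
  | none => PySem.Set.empty
  | some needle => descLoop (buildIndexA rows) PySem.Set.empty [needle]

-- ===== PORT B =====

-- B's by_parent build: dict of lists, append the key if it is not yet among the children
def buildIndexB (rows : List (List (String × String))) : PySem.Dict String (List String) :=
  rows.foldl (fun d row =>
    let parent := PySem.Str.strip (((PySem.Dict.mk row).get? "parent_key").getD "")
    let key := PySem.Str.strip (((PySem.Dict.mk row).get? "key").getD "")
    if key = "" ∨ parent = "" then d
    else PySem.Dict.modify d parent [] (fun cs => if cs.contains key then cs else cs ++ [key]))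
    PySem.Dict.empty

-- Source B's recursive `visit`; the fuel argument only bounds the recursion depth
-- (the visited-set guard is what terminates the Python recursion)
def visitB (byp : PySem.Dict String (List String)) : Nat → PySem.Set String → String → PySem.Set String
  | 0, out, _ => out
  | n + 1, out, node =>
    if PySem.Set.contains out node then out
    else
      ((PySem.Dict.getD byp node []).reverse).foldl
        (fun acc child => visitB byp n acc child) (PySem.Set.add out node)

def class_descendants_alt (rows : List (List (String × String))) (class_key : String) : List String :=
  match normalize_class_key class_key with
  | none => PySem.Set.empty
  | some needle =>
    let byp := buildIndexB rows
    visitB byp (byp.values.flatten.length + 2) PySem.Set.empty needle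

-- ===== PRECONDITION & SPEC =====
def Spec_class_descendants (rows : List (List (String × String))) (class_key : String) (out : List String) : Prop := out = class_descendants_alt rows class_key
instance (rows : List (List (String × String))) (class_key : String) (out : List String) : Decidable (Spec_class_descendants rows class_key out) := by unfold Spec_class_descendants; infer_instance

-- ===== CLAIM (what is proved, stated in full; the proofs are below) =====
def Claim_equal_class_descendants : Prop := ∀ (rows : List (List (String × String))) (class_key : String), Dom_class_descendants rows class_key → Spec_class_descendants rows class_key (class_descendants rows class_key)

-- ===== LEMMAS AND PROOFS =====

theorem visitB_succ_pos (byp : PySem.Dict String (List String)) (n : Nat)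
    (out : PySem.Set String) (node : String) (h : PySem.Set.contains out node = true) :
    visitB byp (n + 1) out node = out := by
  simp only [visitB]; rw [if_pos h]

theorem visitB_succ_neg (byp : PySem.Dict String (List String)) (n : Nat)
    (out : PySem.Set String) (node : String) (h : ¬ PySem.Set.contains out node = true) :
    visitB byp (n + 1) out node =
      ((PySem.Dict.getD byp node []).reverse).foldl
        (fun acc child => visitB byp n acc child) (PySem.Set.add out node) := by
  simp only [visitB]; rw [if_neg h]

-- the two index builds agree (lists with no duplicates vs. PySem sets)
theorem buildIndex_eq (rows : List (List (String × String))) :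
    buildIndexA rows = buildIndexB rows := by
  unfold buildIndexA buildIndexB
  congr 1
  funext d row
  by_cases hk : PySem.Str.strip (((PySem.Dict.mk row).get? "key").getD "") = ""
  · simp [hk]
  · by_cases hp : PySem.Str.strip (((PySem.Dict.mk row).get? "parent_key").getD "") = ""
    · simp [hk, hp]
    · simp [hk, hp, PySem.Set.add, PySem.Set.contains, PySem.Set.empty, List.contains_eq_mem]

theorem visitB_subset (byp : PySem.Dict String (List String)) :
    ∀ (n : Nat) (out : PySem.Set String) (node : String), out ⊆ visitB byp n out node := by
  intro n
  induction n with
  | zero => intro out node; simp [visitB]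
  | succ n ih =>
    intro out node
    simp only [visitB]
    split
    · exact fun _ h => h
    · have hfold : ∀ (l : List String) (acc : PySem.Set String),
          acc ⊆ l.foldl (fun a c => visitB byp n a c) acc := by
        intro l
        induction l with
        | nil => intro acc; simp
        | cons c cs ihl =>
          intro acc
          simp only [List.foldl_cons]
          exact (ih acc c).trans (ihl _)
      refine List.Subset.trans ?_ (hfold _ _)
      intro x hx
      simp [PySem.Set.add]
      split
      · exact hx
      · exact List.mem_append_left _ hx

-- fuel irrelevance for visitB: any fuel above the number of unvisited candidates works
theorem visitB_congr (byp : PySem.Dict String (List String)) :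
    ∀ (n m : Nat) (out : PySem.Set String) (node : String),
      ((insert node byp.values.flatten.toFinset) \ out.toFinset).card < n →
      ((insert node byp.values.flatten.toFinset) \ out.toFinset).card < m →
      visitB byp n out node = visitB byp m out node := by
  intro n
  induction n using Nat.strong_induction_on with
  | _ n ihn =>
    intro m out node hn hm
    match n, m with
    | 0, _ => omega
    | _ + 1, 0 => omega
    | n + 1, m + 1 =>
      by_cases hmem : PySem.Set.contains out node = true
      · rw [visitB_succ_pos byp n out node hmem, visitB_succ_pos byp m out node hmem]
      · rw [visitB_succ_neg byp n out node hmem, visitB_succ_neg byp m out node hmem]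
        have hnode : node ∉ out := by simpa [PySem.Set.contains] using hmem
        have hadd : (PySem.Set.add out node) = out ++ [node] := by
          simp [PySem.Set.add, PySem.Set.contains, hnode]
        have hmemS : node ∈ (insert node byp.values.flatten.toFinset) \ out.toFinset :=
          Finset.mem_sdiff.mpr ⟨Finset.mem_insert_self _ _, by simpa using hnode⟩
        have hsub : byp.values.flatten.toFinset \ (PySem.Set.add out node).toFinset ⊆
            ((insert node byp.values.flatten.toFinset) \ out.toFinset).erase node := by
          intro x hx
          rcases Finset.mem_sdiff.mp hx with ⟨hx1, hx2⟩
          rw [hadd] at hx2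
          have hxout : x ∉ out := fun hxo => hx2 (by simp [hxo])
          have hxc : x ≠ node := fun hxe => hx2 (by simp [hxe])
          exact Finset.mem_erase.mpr ⟨hxc,
            Finset.mem_sdiff.mpr ⟨Finset.mem_insert_of_mem hx1, by simpa using hxout⟩⟩
        have h1 := Finset.card_le_card hsub
        have h2 := Finset.card_erase_of_mem hmemS
        have h3 : 1 ≤ ((insert node byp.values.flatten.toFinset) \ out.toFinset).card :=
          Finset.card_pos.mpr ⟨node, hmemS⟩
        have hcn : (byp.values.flatten.toFinset \ (PySem.Set.add out node).toFinset).card < n := by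
          omega
        have hcm : (byp.values.flatten.toFinset \ (PySem.Set.add out node).toFinset).card < m := by
          omega
        have key : ∀ (l : List String) (acc : PySem.Set String),
            (∀ x ∈ l, x ∈ byp.values.flatten) →
            (byp.values.flatten.toFinset \ acc.toFinset).card < n →
            (byp.values.flatten.toFinset \ acc.toFinset).card < m →
            l.foldl (fun a c => visitB byp n a c) acc
              = l.foldl (fun a c => visitB byp m a c) acc := by
          intro l
          induction l with
          | nil => intro acc _ _ _; rfl
          | cons c cs ihl =>
            intro acc hl hn' hm'
            simp only [List.foldl_cons]
            have hcW : c ∈ byp.values.flatten.toFinset :=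
              List.mem_toFinset.mpr (hl c (by simp))
            have hins : insert c byp.values.flatten.toFinset = byp.values.flatten.toFinset :=
              Finset.insert_eq_self.mpr hcW
            have heq : visitB byp n acc c = visitB byp m acc c := by
              refine ihn n (Nat.lt_succ_self n) m acc c ?_ ?_
              · rw [hins]; exact hn'
              · rw [hins]; exact hm'
            rw [heq]
            refine ihl _ (fun x hx => hl x (by simp [hx])) ?_ ?_
            · have hsub' : byp.values.flatten.toFinset \ (visitB byp m acc c).toFinset ⊆
                  byp.values.flatten.toFinset \ acc.toFinset := by
                refine Finset.sdiff_subset_sdiff (Finset.Subset.refl _) ?_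
                intro x hx
                exact List.mem_toFinset.mpr (visitB_subset byp m acc c (List.mem_toFinset.mp hx))
              exact lt_of_le_of_lt (Finset.card_le_card hsub') hn'
            · have hsub' : byp.values.flatten.toFinset \ (visitB byp m acc c).toFinset ⊆
                  byp.values.flatten.toFinset \ acc.toFinset := by
                refine Finset.sdiff_subset_sdiff (Finset.Subset.refl _) ?_
                intro x hx
                exact List.mem_toFinset.mpr (visitB_subset byp m acc c (List.mem_toFinset.mp hx))
              exact lt_of_le_of_lt (Finset.card_le_card hsub') hm'
        exact key _ _
          (fun x hx => getD_mem_flatten byp node x (List.mem_reverse.mp hx))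
          hcn hcm

theorem foldl_visitB_congr (byp : PySem.Dict String (List String)) :
    ∀ (l : List String) (acc : PySem.Set String) (n m : Nat),
      (∀ x ∈ l, x ∈ byp.values.flatten) →
      byp.values.flatten.length < n →
      byp.values.flatten.length < m →
      l.foldl (fun a c => visitB byp n a c) acc = l.foldl (fun a c => visitB byp m a c) acc := by
  intro l
  induction l with
  | nil => intro acc n m _ _ _; rfl
  | cons c cs ihl =>
    intro acc n m hl hn hm
    simp only [List.foldl_cons]
    have hcW : c ∈ byp.values.flatten.toFinset := List.mem_toFinset.mpr (hl c (by simp))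
    have hins : insert c byp.values.flatten.toFinset = byp.values.flatten.toFinset :=
      Finset.insert_eq_self.mpr hcW
    have hb : ((insert c byp.values.flatten.toFinset) \ acc.toFinset).card
        ≤ byp.values.flatten.length := by
      rw [hins]
      exact le_trans (Finset.card_le_card (Finset.sdiff_subset)) (List.toFinset_card_le _)
    have heq : visitB byp n acc c = visitB byp m acc c :=
      visitB_congr byp n m acc c (by omega) (by omega)
    rw [heq]
    exact ihl _ n m (fun x hx => hl x (by simp [hx])) hn hm

-- A's stack loop computes B's recursive visit, folded over the stack
theorem descLoop_eq_visit (byp : PySem.Dict String (PySem.Set String))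
    (out : PySem.Set String) (stack : List String) :
    descLoop byp out stack =
      stack.foldl (fun o c => visitB byp (byp.values.flatten.length + 2) o c) out := by
  fun_induction descLoop byp out stack with
  | case1 out => rfl
  | case2 out c rest h ih =>
    rw [ih]
    simp only [List.foldl_cons]
    rw [visitB_succ_pos byp (byp.values.flatten.length + 1) out c h]
  | case3 out c rest h ih =>
    rw [ih, List.foldl_append]
    simp only [List.foldl_cons]
    rw [visitB_succ_neg byp (byp.values.flatten.length + 1) out c h]
    have hcongr := foldl_visitB_congr byp ((PySem.Dict.getD byp c []).reverse) (PySem.Set.add out c)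
      (byp.values.flatten.length + 1) (byp.values.flatten.length + 2)
      (fun x hx => getD_mem_flatten byp c x (List.mem_reverse.mp hx))
      (by omega) (by omega)
    rw [hcongr]
    rfl

-- ===== VERDICT (by name: the statement is the Claim_ definition above) =====
theorem class_descendants_spec : Claim_equal_class_descendants := by
  intro rows class_key _
  unfold Spec_class_descendants
  unfold class_descendants class_descendants_alt
  cases hnk : normalize_class_key class_key with
  | none => rfl
  | some needle =>
    simp only []
    rw [buildIndex_eq, descLoop_eq_visit]
    rfl
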